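-- pv_equiv track=rewrite | github.com/AIALRA-0/AGENTSMD | AGENTSMD_CN/scripts/md_validate.py | section_map
-- ===== SOURCE A (Python) =====
-- def section_map(text: str):
--     lines = text.splitlines()
--     idx = []
--     for i, ln in enumerate(lines):
--         if ln.startswith("## "):
--             idx.append((ln[3:].strip(), i))
--     out = {}
--     for p, (name, start) in enumerate(idx):
--         end = idx[p + 1][1] if p + 1 < len(idx) else len(lines)
--         out[name] = lines[start + 1 : end]
--     return out, [n for n, _ in idx]
-- ===== SOURCE B (Python) =====
-- def section_map(text: str):
--     out = {}
--     names = []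
--     cur = None
--     for ln in text.splitlines():
--         if ln.startswith("## "):
--             name = ln[3:].strip()
--             names.append(name)
--             cur = []
--             out[name] = cur
--         elif cur is not None:
--             cur.append(ln)
--     return out, names
-- ===== Notes on version B (the rewrite author's own statement) =====
-- stated objective: simpler
-- what changed: Replaces A's two-pass collect-header-indices-then-slice structure (with an index array and lookahead idx[p+1]) by a single streaming pass that keeps a current-section accumulator and appends each line to it.
import Mathlib
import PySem

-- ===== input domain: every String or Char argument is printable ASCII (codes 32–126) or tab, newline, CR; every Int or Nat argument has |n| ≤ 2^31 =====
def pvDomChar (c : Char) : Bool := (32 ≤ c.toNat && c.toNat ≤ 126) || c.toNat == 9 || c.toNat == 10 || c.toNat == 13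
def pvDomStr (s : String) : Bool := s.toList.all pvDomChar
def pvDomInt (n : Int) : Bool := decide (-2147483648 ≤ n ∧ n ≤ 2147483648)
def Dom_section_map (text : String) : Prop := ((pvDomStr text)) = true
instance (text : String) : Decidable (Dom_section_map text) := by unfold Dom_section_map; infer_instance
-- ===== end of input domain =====

-- B replaces A's collect-header-indices-then-slice two-pass structure by a single streaming
-- pass with a current-section accumulator (objective: simpler; return value only).

-- ===== PORT A =====
-- helper: A's first loop building idx (header name, line index)
def pvIdxOf (lines : List String) : List (String × Int) :=
  (PySem.List.enumerate lines).foldl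
    (fun acc p =>
      if PySem.Str.startswith p.2 "## " then
        acc ++ [(PySem.Str.strip (PySem.Str.slice p.2 (some 3) none), p.1)]
      else acc) []

-- helper: A's second loop building out (end = idx[p+1][1] if p+1 < len(idx) else len(lines))
def pvOutOf (lines : List String) (idx : List (String × Int)) : PySem.Dict String (List String) :=
  (PySem.List.enumerate idx).foldl
    (fun d q =>
      d.insert q.2.1 (PySem.List.slice lines (some (q.2.2 + 1))
        (some (if q.1 + 1 < (idx.length : Int) then (PySem.List.pyGetD idx (q.1 + 1) ("", 0)).2
               else (lines.length : Int)))))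
    PySem.Dict.empty

def section_map (text : String) : (List (String × List String)) × List String :=
  ((pvOutOf (PySem.Str.splitlines text) (pvIdxOf (PySem.Str.splitlines text))).items,
   (pvIdxOf (PySem.Str.splitlines text)).map (·.1))

-- ===== PORT B =====
-- B's loop body; Python's aliased `cur` list (also stored in the dict) is modelled by carrying
-- (name, contents) and re-inserting at the same key on append (overwrite keeps position).
def pvStepB (st : PySem.Dict String (List String) × List String × Option (String × List String))
    (ln : String) : PySem.Dict String (List String) × List String × Option (String × List String) :=
  if PySem.Str.startswith ln "## " then
    let name := PySem.Str.strip (PySem.Str.slice ln (some 3) none)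
    (st.1.insert name [], st.2.1 ++ [name], some (name, []))
  else
    match st.2.2 with
    | some (n, acc) => (st.1.insert n (acc ++ [ln]), st.2.1, some (n, acc ++ [ln]))
    | none => st

def section_map_alt (text : String) : (List (String × List String)) × List String :=
  let fin := (PySem.Str.splitlines text).foldl pvStepB (PySem.Dict.empty, [], none)
  (fin.1.items, fin.2.1)

-- ===== PRECONDITION & SPEC =====
def Spec_section_map (text : String) (out : (List (String × List String)) × List String) : Prop := out = section_map_alt text
instance (text : String) (out : (List (String × List String)) × List String) : Decidable (Spec_section_map text out) := by unfold Spec_section_map; infer_instance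

-- ===== CLAIM (what is proved, stated in full; the proofs are below) =====
def Claim_equal_section_map : Prop := ∀ (text : String), Dom_section_map text → Spec_section_map text (section_map text)

-- ===== LEMMAS AND PROOFS =====
def pvHdr (ln : String) : Bool := PySem.Str.startswith ln "## "
def pvNm (ln : String) : String := PySem.Str.strip (PySem.Str.slice ln (some 3) none)

-- the shared specification: sections as (name, contents) in header order
def pvSecs : List String → List (String × List String)
  | [] => []
  | ln :: rest =>
      if pvHdr ln then (pvNm ln, rest.takeWhile (fun l => !pvHdr l)) :: pvSecs rest
      else pvSecs rest

def pvIns (d : PySem.Dict String (List String)) (s : String × List String) : PySem.Dict String (List String) :=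
  d.insert s.1 s.2

def pvIdxFrom (i : Int) : List String → List (String × Int)
  | [] => []
  | ln :: rest => if pvHdr ln then (pvNm ln, i) :: pvIdxFrom (i + 1) rest else pvIdxFrom (i + 1) rest

def pvLoop2 (lines : List String) : List (String × Int) → PySem.Dict String (List String) → PySem.Dict String (List String)
  | [], d => d
  | (n, s) :: t, d =>
      pvLoop2 lines t (d.insert n (PySem.List.slice lines (some (s + 1))
        (some (match t with | [] => (lines.length : Int) | (_, s') :: _ => s'))))

def pvCurEnd (n : String) (acc : List String) : List String → String × List String
  | [] => (n, acc)
  | ln :: rest => if pvHdr ln then pvCurEnd (pvNm ln) [] rest else pvCurEnd n (acc ++ [ln]) rest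

theorem pvLoop2_single (lines : List String) (n : String) (sv : Int) (d : PySem.Dict String (List String)) :
    pvLoop2 lines [(n, sv)] d
      = d.insert n (PySem.List.slice lines (some (sv + 1)) (some (lines.length : Int))) := rfl

theorem pvLoop2_cons₂ (lines : List String) (n n' : String) (sv sv' : Int)
    (t : List (String × Int)) (d : PySem.Dict String (List String)) :
    pvLoop2 lines ((n, sv) :: (n', sv') :: t) d
      = pvLoop2 lines ((n', sv') :: t)
          (d.insert n (PySem.List.slice lines (some (sv + 1)) (some sv'))) := rfl

theorem pvIdx_eq (ls : List String) : ∀ (i : Int) (acc : List (String × Int)),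
    (PySem.List.enumerate ls i).foldl
      (fun acc p =>
        if PySem.Str.startswith p.2 "## " then
          acc ++ [(PySem.Str.strip (PySem.Str.slice p.2 (some 3) none), p.1)]
        else acc) acc = acc ++ pvIdxFrom i ls := by
  induction ls with
  | nil => intro i acc; simp [PySem.List.enumerate, pvIdxFrom]
  | cons ln rest ih =>
      intro i acc
      rw [PySem.List.enumerate_cons]
      simp only [List.foldl_cons]
      by_cases h : PySem.Str.startswith ln "## "
      · simp only [h, if_pos, pvIdxFrom, pvHdr, pvNm, ih]
        simp [h]
      · simp only [h, if_neg, pvIdxFrom, pvHdr, pvNm, ih]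
        simp [h]

theorem pvIdxOf_eq (ls : List String) : pvIdxOf ls = pvIdxFrom 0 ls := by
  have := pvIdx_eq ls 0 []
  simpa [pvIdxOf] using this

theorem pvIdxFrom_succ (ls : List String) : ∀ (i : Int),
    pvIdxFrom (i + 1) ls = (pvIdxFrom i ls).map (fun p => (p.1, p.2 + 1)) := by
  induction ls with
  | nil => intro i; simp [pvIdxFrom]
  | cons ln rest ih =>
      intro i
      by_cases h : pvHdr ln
      · simp [pvIdxFrom, h, ih]
      · simp [pvIdxFrom, h, ih]

theorem pvIdxFrom_nonneg (ls : List String) : ∀ (i : Int) (p : String × Int),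
    p ∈ pvIdxFrom i ls → i ≤ p.2 := by
  induction ls with
  | nil => intro i p h; simp [pvIdxFrom] at h
  | cons ln rest ih =>
      intro i p h
      by_cases hh : pvHdr ln
      · simp [pvIdxFrom, hh] at h
        rcases h with h | h
        · simp [h]
        · have := ih (i + 1) p h; omega
      · simp [pvIdxFrom, hh] at h
        have := ih (i + 1) p h; omega

theorem pvIdxFrom_nil_takeWhile (ls : List String) : ∀ (i : Int), pvIdxFrom i ls = [] →
    ls.takeWhile (fun l => !pvHdr l) = ls := by
  induction ls with
  | nil => intro i _; simp
  | cons ln rest ih =>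
      intro i h
      by_cases hh : pvHdr ln
      · simp [pvIdxFrom, hh] at h
      · simp [pvIdxFrom, hh] at h
        simp [hh, ih _ h]

theorem pvIdxFrom_nil_secs (ls : List String) : ∀ (i : Int), pvIdxFrom i ls = [] →
    pvSecs ls = [] := by
  induction ls with
  | nil => intro i _; simp [pvSecs]
  | cons ln rest ih =>
      intro i h
      by_cases hh : pvHdr ln
      · simp [pvIdxFrom, hh] at h
      · simp [pvIdxFrom, hh] at h
        simp [pvSecs, hh, ih _ h]

theorem pvIdxFrom_first (ls : List String) : ∀ (i : Int) (n : String) (s : Int) (t : List (String × Int)),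
    pvIdxFrom i ls = (n, s) :: t → s = i + ((ls.takeWhile (fun l => !pvHdr l)).length : Int) := by
  induction ls with
  | nil => intro i n s t h; simp [pvIdxFrom] at h
  | cons ln rest ih =>
      intro i n s t h
      by_cases hh : pvHdr ln
      · simp [pvIdxFrom, hh] at h
        simp [hh]
        omega
      · simp [pvIdxFrom, hh] at h
        have := ih (i + 1) n s t h
        simp [hh]
        omega

theorem pvTake_takeWhile {α : Type} (p : α → Bool) (ls : List α) :
    ls.take (ls.takeWhile p).length = ls.takeWhile p := by
  induction ls with
  | nil => simp
  | cons x rest ih =>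
      by_cases h : p x
      · simp [h, ih]
      · simp [h]

theorem pvAloop (lines : List String) (idx : List (String × Int)) :
    ∀ (t : List (String × Int)) (p : Nat) (d : PySem.Dict String (List String)),
    idx.drop p = t →
    (PySem.List.enumerate t (p : Int)).foldl
      (fun d q =>
        d.insert q.2.1 (PySem.List.slice lines (some (q.2.2 + 1))
          (some (if q.1 + 1 < (idx.length : Int) then (PySem.List.pyGetD idx (q.1 + 1) ("", 0)).2
                 else (lines.length : Int))))) d
    = pvLoop2 lines t d := by
  intro t
  induction t with
  | nil => intro p d _; simp [PySem.List.enumerate, pvLoop2]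
  | cons hd t' ih =>
      intro p d hdrop
      obtain ⟨n, s⟩ := hd
      rw [PySem.List.enumerate_cons]
      simp only [List.foldl_cons]
      have hdrop' : idx.drop (p + 1) = t' := by
        have h := congrArg (List.drop 1) hdrop
        rw [List.drop_drop] at h
        simpa using h
      have hlt : p < idx.length := by
        by_contra hc
        rw [List.drop_eq_nil_of_le (by omega)] at hdrop
        simp at hdrop
      have hend : (if (p : Int) + 1 < (idx.length : Int) then (PySem.List.pyGetD idx ((p : Int) + 1) ("", 0)).2
            else (lines.length : Int))
          = (match t' with | [] => (lines.length : Int) | (_, s') :: _ => s') := by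
        cases t' with
        | nil =>
            have hle : idx.length ≤ p + 1 := by
              have := List.drop_eq_nil_iff.mp hdrop'
              omega
            rw [if_neg (by push_cast; omega)]
        | cons hd2 t'' =>
            have hlen : p + 1 < idx.length := by
              by_contra hc
              rw [List.drop_eq_nil_of_le (by omega)] at hdrop'
              simp at hdrop'
            rw [if_pos (by push_cast; omega)]
            have hc : (p : Int) + 1 = ((p + 1 : Nat) : Int) := by push_cast; omega
            rw [hc, PySem.List.pyGetD_natCast]
            have h0 : idx[p + 1]? = some hd2 := by
              have h0 : (idx.drop (p + 1))[0]? = some hd2 := by rw [hdrop']; rfl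
              rw [List.getElem?_drop] at h0
              simpa using h0
            simp [List.getD, h0]
      rw [hend]
      have hc : (p : Int) + 1 = ((p + 1 : Nat) : Int) := by push_cast; omega
      rw [hc, ih (p + 1) _ hdrop']
      cases t' <;> simp [pvLoop2]

theorem pvOutOf_eq (ls : List String) (idx : List (String × Int)) :
    pvOutOf ls idx = pvLoop2 ls idx PySem.Dict.empty := by
  have := pvAloop ls idx idx 0 PySem.Dict.empty (by simp)
  simpa [pvOutOf] using this

theorem pvLoop2_shift (x : String) (ls : List String) :
    ∀ (idx : List (String × Int)) (d : PySem.Dict String (List String)),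
    (∀ p ∈ idx, 0 ≤ p.2) →
    pvLoop2 (x :: ls) (idx.map (fun p => (p.1, p.2 + 1))) d = pvLoop2 ls idx d := by
  intro idx
  induction idx with
  | nil => intro d _; simp [pvLoop2]
  | cons hd t ih =>
      intro d hnn
      obtain ⟨n, s⟩ := hd
      have hs : 0 ≤ s := hnn (n, s) (by simp)
      cases t with
      | nil =>
          simp only [List.map_cons, List.map_nil]
          rw [pvLoop2_single, pvLoop2_single]
          congr 1
          rw [PySem.List.slice_toNat _ (by omega) (by positivity),
              PySem.List.slice_toNat _ (by omega) (by positivity)]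
          have h1 : (s + 1 + 1).toNat = (s + 1).toNat + 1 := by omega
          rw [h1, List.drop_succ_cons]
          have hA : (((x :: ls).length : Int)).toNat = ls.length + 1 := by simp
          have hB : ((ls.length : Int)).toNat = ls.length := by simp
          congr 1
          omega
      | cons hd2 t2 =>
          obtain ⟨n2, s2⟩ := hd2
          have hs2 : 0 ≤ s2 := hnn (n2, s2) (by simp)
          simp only [List.map_cons]
          rw [pvLoop2_cons₂, pvLoop2_cons₂]
          have hsl : PySem.List.slice (x :: ls) (some (s + 1 + 1)) (some (s2 + 1))
              = PySem.List.slice ls (some (s + 1)) (some s2) := by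
            rw [PySem.List.slice_toNat _ (by omega) (by omega),
                PySem.List.slice_toNat _ (by omega) (by omega)]
            have h1 : (s + 1 + 1).toNat = (s + 1).toNat + 1 := by omega
            rw [h1, List.drop_succ_cons]
            have h2 : (s2 + 1).toNat - ((s + 1).toNat + 1) = s2.toNat - (s + 1).toNat := by omega
            rw [h2]
          rw [hsl]
          have := ih (d.insert n (PySem.List.slice ls (some (s + 1)) (some s2)))
            (fun p hp => hnn p (by simp [hp]))
          simp only [List.map_cons] at this
          exact this

theorem pvAmain (ls : List String) : ∀ (d : PySem.Dict String (List String)),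
    pvLoop2 ls (pvIdxFrom 0 ls) d = (pvSecs ls).foldl pvIns d := by
  induction ls with
  | nil => intro d; simp [pvIdxFrom, pvLoop2, pvSecs]
  | cons ln rest ih =>
      intro d
      by_cases hh : pvHdr ln
      · have h0 : pvIdxFrom 0 (ln :: rest) = (pvNm ln, 0) :: pvIdxFrom (0 + 1) rest := by
          simp [pvIdxFrom, hh]
        have h1 : pvSecs (ln :: rest) = (pvNm ln, rest.takeWhile (fun l => !pvHdr l)) :: pvSecs rest := by
          simp [pvSecs, hh]
        rw [h0, h1, pvIdxFrom_succ]
        cases hI : pvIdxFrom 0 rest with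
        | nil =>
            have htw := pvIdxFrom_nil_takeWhile rest 0 hI
            have hsec := pvIdxFrom_nil_secs rest 0 hI
            have hcontent : PySem.List.slice (ln :: rest) (some ((0 : Int) + 1))
                (some (((ln :: rest).length : Int))) = rest := by
              rw [PySem.List.slice_toNat _ (by omega) (by positivity)]
              simp
            rw [hsec, List.map_nil, pvLoop2_single, hcontent, htw]
            simp [pvIns]
        | cons hd t =>
            obtain ⟨n', s'⟩ := hd
            have hs' := pvIdxFrom_first rest 0 n' s' t hI
            have hcontent : PySem.List.slice (ln :: rest) (some ((0 : Int) + 1)) (some (s' + 1))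
                = rest.takeWhile (fun l => !pvHdr l) := by
              rw [PySem.List.slice_toNat _ (by omega) (by omega)]
              have h2 : (s' + 1).toNat - ((0 : Int) + 1).toNat
                  = (rest.takeWhile (fun l => !pvHdr l)).length := by omega
              rw [h2]
              have h3 : ((0 : Int) + 1).toNat = 1 := by omega
              rw [h3, List.drop_succ_cons, List.drop_zero, pvTake_takeWhile]
            rw [List.map_cons, pvLoop2_cons₂, hcontent]
            have hshift := pvLoop2_shift ln rest ((n', s') :: t)
              (d.insert (pvNm ln) (rest.takeWhile (fun l => !pvHdr l)))
              (by intro p hp; exact pvIdxFrom_nonneg rest 0 p (by rw [hI]; exact hp))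
            simp only [List.map_cons] at hshift
            rw [hshift, ← hI, ih]
            simp [pvIns]
      · have h0 : pvIdxFrom 0 (ln :: rest) = pvIdxFrom (0 + 1) rest := by
          simp [pvIdxFrom, hh]
        have h1 : pvSecs (ln :: rest) = pvSecs rest := by
          simp [pvSecs, hh]
        rw [h0, h1, pvIdxFrom_succ,
            pvLoop2_shift ln rest _ d (fun p hp => pvIdxFrom_nonneg rest 0 p hp), ih]

theorem pvNames_eq (ls : List String) : ∀ (i : Int),
    (pvIdxFrom i ls).map (·.1) = (pvSecs ls).map (·.1) := by
  induction ls with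
  | nil => intro i; simp [pvIdxFrom, pvSecs]
  | cons ln rest ih =>
      intro i
      by_cases hh : pvHdr ln
      · simp [pvIdxFrom, pvSecs, hh, ih]
      · simp [pvIdxFrom, pvSecs, hh, ih]

theorem pvB1 (ls : List String) : ∀ (d : PySem.Dict String (List String)) (names : List String)
    (n : String) (acc : List String),
    ls.foldl pvStepB (d.insert n acc, names, some (n, acc)) =
      ((pvSecs ls).foldl pvIns (d.insert n (acc ++ ls.takeWhile (fun l => !pvHdr l))),
       names ++ (pvSecs ls).map (·.1), some (pvCurEnd n acc ls)) := by
  induction ls with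
  | nil => intro d names n acc; simp [pvSecs, pvCurEnd]
  | cons ln rest ih =>
      intro d names n acc
      by_cases hh : pvHdr ln
      · have hstep : pvStepB (d.insert n acc, names, some (n, acc)) ln
            = ((d.insert n acc).insert (pvNm ln) [], names ++ [pvNm ln], some (pvNm ln, [])) := by
          simp [pvStepB, pvHdr, pvNm] at hh ⊢
          simp [hh]
        rw [List.foldl_cons, hstep, ih]
        simp [pvSecs, pvCurEnd, hh, pvIns]
      · have hstep : pvStepB (d.insert n acc, names, some (n, acc)) ln
            = (d.insert n (acc ++ [ln]), names, some (n, acc ++ [ln])) := by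
          simp [pvStepB, pvHdr] at hh ⊢
          simp [hh, PySem.Dict.insert_insert_self]
        rw [List.foldl_cons, hstep, ih]
        simp [pvSecs, pvCurEnd, hh]

theorem pvB0 (ls : List String) : ∀ (d : PySem.Dict String (List String)) (names : List String),
    (ls.foldl pvStepB (d, names, none)).1 = (pvSecs ls).foldl pvIns d ∧
    (ls.foldl pvStepB (d, names, none)).2.1 = names ++ (pvSecs ls).map (·.1) := by
  induction ls with
  | nil => intro d names; simp [pvSecs]
  | cons ln rest ih =>
      intro d names
      by_cases hh : pvHdr ln
      · have hstep : pvStepB (d, names, none) ln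
            = (d.insert (pvNm ln) [], names ++ [pvNm ln], some (pvNm ln, [])) := by
          simp [pvStepB, pvHdr, pvNm] at hh ⊢
          simp [hh]
        have h1 : d.insert (pvNm ln) [] = d.insert (pvNm ln) ([] ++ []) := by simp
        rw [List.foldl_cons, hstep]
        rw [show (d.insert (pvNm ln) [] : PySem.Dict String (List String)) = d.insert (pvNm ln) [] from rfl]
        have := pvB1 rest (d := d) (names := names ++ [pvNm ln]) (n := pvNm ln) (acc := [])
        rw [this]
        constructor
        · simp [pvSecs, hh, pvIns]
        · simp [pvSecs, hh]
      · have hstep : pvStepB (d, names, none) ln = (d, names, none) := by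
          simp [pvStepB, pvHdr] at hh ⊢
          simp [hh]
        rw [List.foldl_cons, hstep]
        rcases ih d names with ⟨h1, h2⟩
        refine ⟨h1.trans ?_, h2.trans ?_⟩ <;> simp [pvSecs, hh]

-- ===== VERDICT (by name: the statement is the Claim_ definition above) =====
theorem section_map_spec : Claim_equal_section_map := by
  intro text _
  unfold Spec_section_map section_map section_map_alt
  have hA := pvAmain (PySem.Str.splitlines text) PySem.Dict.empty
  have hB := pvB0 (PySem.Str.splitlines text) PySem.Dict.empty []
  rw [pvIdxOf_eq, pvOutOf_eq, hA, pvNames_eq]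
  show _ = (((PySem.Str.splitlines text).foldl pvStepB (PySem.Dict.empty, [], none)).1.items,
            ((PySem.Str.splitlines text).foldl pvStepB (PySem.Dict.empty, [], none)).2.1)
  rw [hB.1, hB.2]
  simp
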